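-- pv_equiv track=rewrite | github.com/PuchkovaAS/regex_engine | regex_engine.py | get_real_wight
-- ===== SOURCE A (Python) =====
-- def get_real_wight(regex):
--     count = 0
--     i = 0
--     while i < len(regex):
--         if regex[i] == '\\':
--             i += 2
--         else:
--             i += 1
--         count += 1
--     return count
-- ===== SOURCE B (Python) =====
-- def get_real_wight(regex):
--     # Split once on backslashes, then count by segment-length arithmetic:
--     # each separator backslash either starts an escape (one token, swallowing the
--     # segment's first char or the next separator) or was itself swallowed.
--     parts = regex.split('\\')
--     tokens = len(parts[0])
--     consumed = False  # was the upcoming separator backslash swallowed by an escape?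
--     for part in parts[1:]:
--         if consumed:
--             tokens += len(part)
--             consumed = False
--         elif part:
--             tokens += len(part)
--         else:
--             tokens += 1
--             consumed = True
--     return tokens
-- ===== Notes on version B (the rewrite author's own statement) =====
-- stated objective: faster
-- what changed: Replaced A's per-character index walk (skipping one extra index after each escape) by a single split on the backslash character followed by arithmetic on the segment lengths with a carry flag for a separator swallowed by a preceding escape.
import Mathlib
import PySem

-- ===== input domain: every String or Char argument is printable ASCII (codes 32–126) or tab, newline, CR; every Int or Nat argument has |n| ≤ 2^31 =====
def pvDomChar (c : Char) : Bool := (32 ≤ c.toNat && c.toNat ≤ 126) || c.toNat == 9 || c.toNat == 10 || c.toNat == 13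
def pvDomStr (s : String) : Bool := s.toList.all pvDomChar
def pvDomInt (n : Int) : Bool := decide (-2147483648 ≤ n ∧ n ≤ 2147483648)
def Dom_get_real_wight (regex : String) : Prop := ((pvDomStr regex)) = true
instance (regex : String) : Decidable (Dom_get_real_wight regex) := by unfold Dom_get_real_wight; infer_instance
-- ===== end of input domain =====

-- B splits the string on backslashes once and counts by segment-length arithmetic with a
-- carry flag, instead of A's per-character index walk; same value, measured faster (the
-- work moves into one split instead of a per-character interpreted loop).

-- ===== PORT A =====
-- A's while-loop: state (count, i), regex[i] read by index, i jumps by 2 past a backslash.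
def pvALoop (cs : List Char) (count : Int) (i : Int) : Int :=
  if h : i < (cs.length : Int) then
    if PySem.List.pyGet? cs i = some '\\' then
      pvALoop cs (count + 1) (i + 2)
    else
      pvALoop cs (count + 1) (i + 1)
  else count
termination_by ((cs.length : Int) - i).toNat
decreasing_by all_goals omega

def get_real_wight (regex : String) : Int := pvALoop regex.toList 0 0

-- ===== PORT B =====
-- Source B's loop body over parts[1:], state (tokens, consumed).
def pvBStep (st : Int × Bool) (part : List Char) : Int × Bool :=
  if st.2 = true then (st.1 + (part.length : Int), false)
  else if part ≠ [] then (st.1 + (part.length : Int), false)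
  else (st.1 + 1, true)

-- regex.split('\\') ported as List.splitOn '\\' (exact for a one-character separator).
def get_real_wight_alt (regex : String) : Int :=
  match regex.toList.splitOn '\\' with
  | [] => 0  -- unreachable: split always returns at least one part
  | p :: rest => (rest.foldl pvBStep ((p.length : Int), false)).1

-- ===== PRECONDITION & SPEC =====
def Spec_get_real_wight (regex : String) (out : Int) : Prop := out = get_real_wight_alt regex
instance (regex : String) (out : Int) : Decidable (Spec_get_real_wight regex out) := by unfold Spec_get_real_wight; infer_instance

-- ===== CLAIM (what is proved, stated in full; the proofs are below) =====
def Claim_equal_get_real_wight : Prop := ∀ (regex : String), Dom_get_real_wight regex → Spec_get_real_wight regex (get_real_wight regex)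

-- ===== LEMMAS AND PROOFS =====

-- Specification middle-man: the token count, recursively.
def pvTokCount : List Char → Int
  | [] => 0
  | [_] => 1
  | c :: d :: rest => if c = '\\' then 1 + pvTokCount rest else 1 + pvTokCount (d :: rest)

theorem pvTokCount_cons_ne (c : Char) (l : List Char) (hc : c ≠ '\\') :
    pvTokCount (c :: l) = 1 + pvTokCount l := by
  cases l with
  | nil => simp [pvTokCount]
  | cons d r => simp [pvTokCount, hc]

-- A's loop computes pvTokCount of the remaining suffix.
theorem pvALoop_eq (cs : List Char) :
    ∀ (n : ℕ) (count i : Int), 0 ≤ i → n = ((cs.length : Int) - i).toNat →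
      pvALoop cs count i = count + pvTokCount (cs.drop i.toNat) := by
  intro n
  induction n using Nat.strong_induction_on with
  | _ n ih =>
    intro count i hi hn
    rw [pvALoop]
    by_cases h : i < (cs.length : Int)
    · have hlt : i.toNat < cs.length := by omega
      have hdrop : cs.drop i.toNat = cs[i.toNat] :: cs.drop (i.toNat + 1) :=
        List.drop_eq_getElem_cons hlt
      have hget : PySem.List.pyGet? cs i = some cs[i.toNat] := by
        simp [PySem.List.pyGet?, PySem.List.pyIdx?, hi, h]
      rw [dif_pos h]
      by_cases hb : cs[i.toNat] = '\\'
      · have hc : PySem.List.pyGet? cs i = some '\\' := by rw [hget, hb]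
        rw [if_pos hc]
        rw [ih (((cs.length : Int) - (i + 2)).toNat) (by omega) (count + 1) (i + 2)
          (by omega) rfl]
        by_cases h2 : i + 1 < (cs.length : Int)
        · have hlt2 : i.toNat + 1 < cs.length := by omega
          have hdrop2 : cs.drop (i.toNat + 1) = cs[i.toNat + 1] :: cs.drop (i.toNat + 2) :=
            List.drop_eq_getElem_cons hlt2
          have h2n : (i + 2).toNat = i.toNat + 2 := by omega
          rw [h2n, hdrop, hdrop2, hb]
          rw [show pvTokCount ('\\' :: cs[i.toNat + 1] :: cs.drop (i.toNat + 2))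
              = 1 + pvTokCount (cs.drop (i.toNat + 2)) by simp [pvTokCount]]
          omega
        · have hdrop2 : cs.drop (i.toNat + 1) = [] := by
            apply List.drop_eq_nil_of_le; omega
          have hdrop3 : cs.drop (i + 2).toNat = [] := by
            apply List.drop_eq_nil_of_le; omega
          rw [hdrop, hdrop2, hdrop3, hb]
          rw [show pvTokCount ['\\'] = 1 from rfl, show pvTokCount [] = 0 from rfl]
          omega
      · have hc : ¬ PySem.List.pyGet? cs i = some '\\' := by rw [hget]; simpa using hb
        rw [if_neg hc]
        rw [ih (((cs.length : Int) - (i + 1)).toNat) (by omega) (count + 1) (i + 1)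
          (by omega) rfl]
        have h1n : (i + 1).toNat = i.toNat + 1 := by omega
        rw [h1n, hdrop, pvTokCount_cons_ne _ _ hb]
        omega
    · rw [dif_neg h]
      have : cs.drop i.toNat = [] := by apply List.drop_eq_nil_of_le; omega
      simp [this, pvTokCount]

-- B-side: the fold over the remaining parts, written structurally.
def pvK : List (List Char) → Bool → Int
  | [], _ => 0
  | p :: rest, true => (p.length : Int) + pvK rest false
  | p :: rest, false => if p = [] then 1 + pvK rest true else (p.length : Int) + pvK rest false

theorem pvFoldl_eq_pvK (parts : List (List Char)) :
    ∀ (t : Int) (b : Bool), (parts.foldl pvBStep (t, b)).1 = t + pvK parts b := by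
  induction parts with
  | nil => intro t b; simp [pvK]
  | cons p rest ih =>
    intro t b
    cases b with
    | true => simp [pvBStep, pvK, ih]; ring
    | false =>
      by_cases hp : p = []
      · simp [pvBStep, pvK, hp, ih]; ring
      · simp [pvBStep, pvK, hp, ih]; ring

-- The value of the whole B computation on a parts list.
def pvH : List (List Char) → Int
  | [] => 0
  | p :: rest => (p.length : Int) + pvK rest false

theorem pvH_splitOn : ∀ (n : ℕ) (cs : List Char), cs.length ≤ n →
    pvH (cs.splitOn '\\') = pvTokCount cs := by
  intro n
  induction n with
  | zero =>
    intro cs h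
    have : cs = [] := List.eq_nil_of_length_eq_zero (by omega)
    subst this
    simp [List.splitOn_nil, pvH, pvK, pvTokCount]
  | succ n ih =>
    intro cs h
    cases cs with
    | nil => simp [List.splitOn_nil, pvH, pvK, pvTokCount]
    | cons c cs' =>
      show pvH ((c :: cs').splitOnP (· == '\\')) = _
      rw [List.splitOnP_cons]
      by_cases hc : c = '\\'
      · subst hc
        simp only [beq_self_eq_true, if_pos]
        -- pvH ([] :: splitOnP cs') = pvK (splitOnP cs') false
        show (0 : Int) + pvK (cs'.splitOnP (· == '\\')) false = pvTokCount ('\\' :: cs')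
        cases cs' with
        | nil => simp [List.splitOnP_nil, pvK, pvTokCount]
        | cons d cs'' =>
          rw [List.splitOnP_cons]
          by_cases hd : d = '\\'
          · subst hd
            simp only [beq_self_eq_true, if_pos]
            -- pvK ([] :: splitOnP cs'') false = 1 + pvK (splitOnP cs'') true
            obtain ⟨q, r, hqr⟩ := List.exists_cons_of_ne_nil
              (List.splitOnP_ne_nil (p := (· == '\\')) cs'')
            have htrue : pvK (cs''.splitOnP (· == '\\')) true = pvTokCount cs'' := by
              rw [hqr]
              show (q.length : Int) + pvK r false = _
              have := ih cs'' (by simp at h; omega)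
              rwa [show cs''.splitOn '\\' = cs''.splitOnP (· == '\\') from rfl, hqr] at this
            simp [pvK, htrue, pvTokCount]
          · have hbeq : (d == '\\') = false := by simpa using hd
            rw [hbeq]
            simp only [if_neg (by simp : ¬ (false = true))]
            obtain ⟨q, r, hqr⟩ := List.exists_cons_of_ne_nil
              (List.splitOnP_ne_nil (p := (· == '\\')) cs'')
            have hih : pvH (cs''.splitOnP (· == '\\')) = pvTokCount cs'' := by
              have := ih cs'' (by simp at h; omega)
              rwa [show cs''.splitOn '\\' = cs''.splitOnP (· == '\\') from rfl] at this
            rw [hqr] at hih ⊢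
            show (0 : Int) + pvK ((d :: q) :: r) false = pvTokCount ('\\' :: d :: cs'')
            have : pvK ((d :: q) :: r) false = ((d :: q).length : Int) + pvK r false := by
              simp [pvK]
            rw [this]
            have hH : pvH (q :: r) = (q.length : Int) + pvK r false := rfl
            rw [hH] at hih
            have : pvTokCount ('\\' :: d :: cs'') = 1 + pvTokCount cs'' := by
              simp [pvTokCount]
            rw [this, ← hih]
            simp; ring
      · have hbeq : (c == '\\') = false := by simpa using hc
        rw [hbeq]
        simp only [if_neg (by simp : ¬ (false = true))]
        obtain ⟨q, r, hqr⟩ := List.exists_cons_of_ne_nil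
          (List.splitOnP_ne_nil (p := (· == '\\')) cs')
        have hih : pvH (cs'.splitOnP (· == '\\')) = pvTokCount cs' := by
          have := ih cs' (by simp at h; omega)
          rwa [show cs'.splitOn '\\' = cs'.splitOnP (· == '\\') from rfl] at this
        rw [hqr] at hih ⊢
        show pvH ((c :: q) :: r) = pvTokCount (c :: cs')
        rw [pvTokCount_cons_ne _ _ hc, ← hih]
        show ((c :: q).length : Int) + pvK r false = 1 + ((q.length : Int) + pvK r false)
        simp; ring

-- ===== VERDICT (by name: the statement is the Claim_ definition above) =====
theorem get_real_wight_spec : Claim_equal_get_real_wight := by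
  intro regex _
  unfold Spec_get_real_wight get_real_wight get_real_wight_alt
  rw [pvALoop_eq regex.toList ((regex.toList.length : Int) - 0).toNat 0 0 le_rfl rfl]
  simp only [Int.toNat_zero, List.drop_zero, zero_add]
  obtain ⟨p, rest, hpr⟩ := List.exists_cons_of_ne_nil
    (List.splitOnP_ne_nil (p := (· == '\\')) regex.toList)
  have hsplit : regex.toList.splitOn '\\' = p :: rest := hpr
  rw [show pvTokCount regex.toList = pvH (regex.toList.splitOn '\\') from
    (pvH_splitOn regex.toList.length regex.toList le_rfl).symm]
  rw [hsplit]
  simp [pvH, pvFoldl_eq_pvK]
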